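-- pv_equiv track=rewrite | github.com/AdamKBeck/EPIJudge | epi_judge_python/snake_string.py | snake_string
-- ===== SOURCE A (Python) =====
-- def snake_string(s: str) -> str:
--     ans = []
--
--     # top row
--     for i in range(1, len(s), 4):
--         ans.append(s[i])
--
--     # middle row
--     for i in range(0, len(s), 2):
--         ans.append(s[i])
--
--     # bottom row
--     for i in range(3, len(s), 4):
--         ans.append(s[i])
--
--     return ''.join(ans)
-- ===== SOURCE B (Python) =====
-- def snake_string(s: str) -> str:
--     top, mid, bot = [], [], []
--     for i, c in enumerate(s):
--         r = i % 4
--         if r == 1: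
--             top.append(c)
--         elif r == 3:
--             bot.append(c)
--         else:
--             mid.append(c)
--     return ''.join(top + mid + bot)
-- ===== Notes on version B (the rewrite author's own statement) =====
-- stated objective: alternative
-- what changed: Replaced the three strided scans of s (steps 4, 2, 4) by a single enumerate pass that buckets each character into top/middle/bottom by i % 4 and joins the three buckets once.
import Mathlib
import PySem

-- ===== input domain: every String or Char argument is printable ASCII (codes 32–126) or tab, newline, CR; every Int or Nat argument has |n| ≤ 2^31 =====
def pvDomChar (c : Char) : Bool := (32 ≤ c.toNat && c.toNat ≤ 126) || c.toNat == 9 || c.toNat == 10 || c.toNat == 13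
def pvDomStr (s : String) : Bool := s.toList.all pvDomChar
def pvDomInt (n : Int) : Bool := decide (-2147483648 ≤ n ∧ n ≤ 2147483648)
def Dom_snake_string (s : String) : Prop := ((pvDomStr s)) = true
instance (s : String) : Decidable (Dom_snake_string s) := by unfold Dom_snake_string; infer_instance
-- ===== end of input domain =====

-- B replaces A's three strided scans by one bucketing pass over enumerate(s) (objective: alternative decomposition, same cost).

-- ===== PORT A =====
-- A: three loops over range(1,n,4), range(0,n,2), range(3,n,4), each appending s[i] to ans.
def snake_string (s : String) : String :=
  let cs := s.toList
  let n : Int := cs.length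
  let ans : List Char :=
    (PySem.List.pyRange 1 n 4).foldl (fun ans i => ans ++ [PySem.List.pyGetD cs i ' ']) []
  let ans :=
    (PySem.List.pyRange 0 n 2).foldl (fun ans i => ans ++ [PySem.List.pyGetD cs i ' ']) ans
  let ans :=
    (PySem.List.pyRange 3 n 4).foldl (fun ans i => ans ++ [PySem.List.pyGetD cs i ' ']) ans
  String.mk ans

-- ===== PORT B =====
-- per-character step of B's single pass: state is (index, top, mid, bot)
def snakeStep (st : Nat × List Char × List Char × List Char) (c : Char) :
    Nat × List Char × List Char × List Char :=
  let r := st.1 % 4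
  if r = 1 then (st.1 + 1, st.2.1 ++ [c], st.2.2.1, st.2.2.2)
  else if r = 3 then (st.1 + 1, st.2.1, st.2.2.1, st.2.2.2 ++ [c])
  else (st.1 + 1, st.2.1, st.2.2.1 ++ [c], st.2.2.2)

def snake_string_alt (s : String) : String :=
  let st := s.toList.foldl snakeStep (0, [], [], [])
  String.mk (st.2.1 ++ st.2.2.1 ++ st.2.2.2)

-- ===== PRECONDITION & SPEC =====
def Spec_snake_string (s : String) (out : String) : Prop := out = snake_string_alt s
instance (s : String) (out : String) : Decidable (Spec_snake_string s out) := by unfold Spec_snake_string; infer_instance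

-- ===== CLAIM (what is proved, stated in full; the proofs are below) =====
def Claim_equal_snake_string : Prop := ∀ (s : String), Dom_snake_string s → Spec_snake_string s (snake_string s)

-- ===== LEMMAS AND PROOFS =====

-- range(1, n+1, 4) extends range(1, n, 4) by n exactly when n % 4 = 1
lemma pyRange_top_snoc (n : Nat) :
    PySem.List.pyRange 1 ((n : Int) + 1) 4 =
      PySem.List.pyRange 1 (n : Int) 4 ++ (if n % 4 = 1 then [(n : Int)] else []) := by
  rw [PySem.List.pyRange_of_pos _ _ (by norm_num : (0:Int) < 4),
      PySem.List.pyRange_of_pos _ _ (by norm_num : (0:Int) < 4)]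
  by_cases h : n % 4 = 1
  · have h1 : (if (1:Int) < (n:Int) + 1 then (((n:Int) + 1 - 1 + 4 - 1) / 4).toNat else 0)
        = (if (1:Int) < (n:Int) then (((n:Int) - 1 + 4 - 1) / 4).toNat else 0) + 1 := by
      split_ifs <;> omega
    rw [h1, List.range_succ, List.map_append]
    simp only [h, if_true, List.map_cons, List.map_nil]
    congr 2
    split_ifs <;> omega
  · have h1 : (if (1:Int) < (n:Int) + 1 then (((n:Int) + 1 - 1 + 4 - 1) / 4).toNat else 0)
        = (if (1:Int) < (n:Int) then (((n:Int) - 1 + 4 - 1) / 4).toNat else 0) := by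
      split_ifs <;> omega
    rw [h1]
    simp [h]

-- range(0, n+1, 2) extends range(0, n, 2) by n exactly when n % 2 = 0
lemma pyRange_mid_snoc (n : Nat) :
    PySem.List.pyRange 0 ((n : Int) + 1) 2 =
      PySem.List.pyRange 0 (n : Int) 2 ++ (if n % 2 = 0 then [(n : Int)] else []) := by
  rw [PySem.List.pyRange_of_pos _ _ (by norm_num : (0:Int) < 2),
      PySem.List.pyRange_of_pos _ _ (by norm_num : (0:Int) < 2)]
  by_cases h : n % 2 = 0
  · have h1 : (if (0:Int) < (n:Int) + 1 then (((n:Int) + 1 - 0 + 2 - 1) / 2).toNat else 0)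
        = (if (0:Int) < (n:Int) then (((n:Int) - 0 + 2 - 1) / 2).toNat else 0) + 1 := by
      split_ifs <;> omega
    rw [h1, List.range_succ, List.map_append]
    simp only [h, if_true, List.map_cons, List.map_nil]
    congr 2
    split_ifs <;> omega
  · have h1 : (if (0:Int) < (n:Int) + 1 then (((n:Int) + 1 - 0 + 2 - 1) / 2).toNat else 0)
        = (if (0:Int) < (n:Int) then (((n:Int) - 0 + 2 - 1) / 2).toNat else 0) := by
      split_ifs <;> omega
    rw [h1]
    simp [h]

-- range(3, n+1, 4) extends range(3, n, 4) by n exactly when n % 4 = 3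
lemma pyRange_bot_snoc (n : Nat) :
    PySem.List.pyRange 3 ((n : Int) + 1) 4 =
      PySem.List.pyRange 3 (n : Int) 4 ++ (if n % 4 = 3 then [(n : Int)] else []) := by
  rw [PySem.List.pyRange_of_pos _ _ (by norm_num : (0:Int) < 4),
      PySem.List.pyRange_of_pos _ _ (by norm_num : (0:Int) < 4)]
  by_cases h : n % 4 = 3
  · have h1 : (if (3:Int) < (n:Int) + 1 then (((n:Int) + 1 - 3 + 4 - 1) / 4).toNat else 0)
        = (if (3:Int) < (n:Int) then (((n:Int) - 3 + 4 - 1) / 4).toNat else 0) + 1 := by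
      split_ifs <;> omega
    rw [h1, List.range_succ, List.map_append]
    simp only [h, if_true, List.map_cons, List.map_nil]
    congr 2
    split_ifs <;> omega
  · have h1 : (if (3:Int) < (n:Int) + 1 then (((n:Int) + 1 - 3 + 4 - 1) / 4).toNat else 0)
        = (if (3:Int) < (n:Int) then (((n:Int) - 3 + 4 - 1) / 4).toNat else 0) := by
      split_ifs <;> omega
    rw [h1]
    simp [h]

-- appending a character does not change the characters fetched at indices below the old length
lemma map_get_snoc_stable (l : List Char) (c : Char) (a k : Int) (ha : 0 ≤ a) (hk : 0 < k) :
    (PySem.List.pyRange a (l.length : Int) k).map (fun i => PySem.List.pyGetD (l ++ [c]) i ' ')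
      = (PySem.List.pyRange a (l.length : Int) k).map (fun i => PySem.List.pyGetD l i ' ') := by
  apply List.map_congr_left
  intro i hi
  obtain ⟨h1, h2, -⟩ := (PySem.List.mem_pyRange_iff_of_pos hk i).mp hi
  obtain ⟨m, rfl⟩ : ∃ m : Nat, i = (m : Int) := ⟨i.toNat, by omega⟩
  have hm : m < l.length := by exact_mod_cast h2
  rw [PySem.List.pyGetD_natCast, PySem.List.pyGetD_natCast]
  simp [List.getD_eq_getElem?_getD, List.getElem?_append_left hm]

-- invariant of B's single pass: after consuming cs the state holds exactly A's three rows
lemma snake_inv (cs : List Char) :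
    cs.foldl snakeStep (0, [], [], []) =
      (cs.length,
        (PySem.List.pyRange 1 (cs.length : Int) 4).map (fun i => PySem.List.pyGetD cs i ' '),
        (PySem.List.pyRange 0 (cs.length : Int) 2).map (fun i => PySem.List.pyGetD cs i ' '),
        (PySem.List.pyRange 3 (cs.length : Int) 4).map (fun i => PySem.List.pyGetD cs i ' ')) := by
  induction cs using List.reverseRecOn with
  | nil => simp [PySem.List.pyRange]
  | append_singleton l c ih =>
      rw [List.foldl_append, ih]
      simp only [List.foldl_cons, List.foldl_nil]
      have hlen : ((l ++ [c]).length : Int) = (l.length : Int) + 1 := by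
        simp
      rw [hlen, pyRange_top_snoc, pyRange_mid_snoc, pyRange_bot_snoc,
          List.map_append, List.map_append, List.map_append,
          map_get_snoc_stable l c 1 4 (by norm_num) (by norm_num),
          map_get_snoc_stable l c 0 2 (by norm_num) (by norm_num),
          map_get_snoc_stable l c 3 4 (by norm_num) (by norm_num)]
      unfold snakeStep
      have h4 : l.length % 4 = 0 ∨ l.length % 4 = 1 ∨ l.length % 4 = 2 ∨ l.length % 4 = 3 := by
        omega
      rcases h4 with h | h | h | h
      · simp [h, show l.length % 2 = 0 from by omega]
      · simp [h, show l.length % 2 = 1 from by omega]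
      · simp [h, show l.length % 2 = 0 from by omega]
      · simp [h, show l.length % 2 = 1 from by omega]

-- ===== VERDICT (by name: the statement is the Claim_ definition above) =====
theorem snake_string_spec : Claim_equal_snake_string := by
  intro s _
  unfold Spec_snake_string snake_string snake_string_alt
  simp only [PySem.List.foldl_append_singleton_eq_map]
  rw [snake_inv s.toList]
  simp
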